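-- pv_equiv track=rewrite | github.com/hector-cao/virt-hwe | gen-hwe.py | find_field_block
-- ===== SOURCE A (Python) =====
-- def find_field_block(stanza: list[str], field: str) -> tuple[int, int] | None:
--     header = f"{field}:"
--     for i, line in enumerate(stanza):
--         if line.startswith(header):
--             end = i + 1
--             while end < len(stanza) and stanza[end].startswith((" ", "\t")):
--                 end += 1
--             return i, end
--     return None
-- ===== SOURCE B (Python) =====
-- def find_field_block(stanza, field):
--     # single backward pass: carry the index of the next non-indented line
--     header = field + ":"
--     ans = None
--     bound = len(stanza)
--     for i in range(len(stanza) - 1, -1, -1):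
--         if stanza[i].startswith(header):
--             ans = (i, bound)
--         if not stanza[i].startswith((" ", "\t")):
--             bound = i
--     return ans
-- ===== Notes on version B (the rewrite author's own statement) =====
-- stated objective: alternative
-- what changed: Replaces the find-header-then-inner-while scan by a single backward pass that carries the index of the next non-indented line, so the inner while loop disappears.
import Mathlib
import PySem

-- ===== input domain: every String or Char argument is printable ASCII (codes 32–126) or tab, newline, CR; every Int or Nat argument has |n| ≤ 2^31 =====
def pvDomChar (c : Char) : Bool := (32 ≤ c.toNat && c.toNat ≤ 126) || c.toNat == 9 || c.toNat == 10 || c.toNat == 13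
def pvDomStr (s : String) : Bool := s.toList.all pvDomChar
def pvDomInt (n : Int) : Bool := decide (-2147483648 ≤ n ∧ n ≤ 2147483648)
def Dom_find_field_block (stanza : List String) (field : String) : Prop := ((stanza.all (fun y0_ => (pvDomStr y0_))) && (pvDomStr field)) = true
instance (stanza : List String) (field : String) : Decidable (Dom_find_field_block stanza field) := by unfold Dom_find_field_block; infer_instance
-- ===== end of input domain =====

-- ===== PORT A =====
def pvIndent (l : String) : Bool :=
  PySem.Str.startswith l " " || PySem.Str.startswith l "\t"

-- inner while loop of A: advance `end` while it is in range and the line is indented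
def pvInnerWhile (stanza : List String) (e : Nat) : Nat :=
  if h : e < stanza.length ∧ pvIndent stanza[e]! then
    pvInnerWhile stanza (e + 1)
  else e
termination_by stanza.length - e
decreasing_by omega

-- A's for-loop with early return, over the remaining lines with the running index i
def pvFindA (stanza : List String) (header : String) (i : Nat) : List String → Option (Int × Int)
  | [] => none
  | l :: ls =>
      if PySem.Str.startswith l header then
        some ((i : Int), (pvInnerWhile stanza (i + 1) : Int))
      else pvFindA stanza header (i + 1) ls

def find_field_block (stanza : List String) (field : String) : Option (Int × Int) :=
  pvFindA stanza (field ++ ":") 0 stanza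

-- ===== PORT B =====
-- B: one backward pass; second component is the carried `bound` (next non-indented index ≥ i)
def pvAltAux (header : String) (i : Nat) : List String → Option (Int × Int) × Nat
  | [] => (none, i)
  | l :: ls =>
      let (ans, bound) := pvAltAux header (i + 1) ls
      (if PySem.Str.startswith l header then some ((i : Int), (bound : Int)) else ans,
       if !(pvIndent l) then i else bound)

def find_field_block_alt (stanza : List String) (field : String) : Option (Int × Int) :=
  (pvAltAux (field ++ ":") 0 stanza).1

-- ===== PRECONDITION & SPEC =====
def Spec_find_field_block (stanza : List String) (field : String) (out : Option (Int × Int)) : Prop := out = find_field_block_alt stanza field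
instance (stanza : List String) (field : String) (out : Option (Int × Int)) : Decidable (Spec_find_field_block stanza field out) := by unfold Spec_find_field_block; infer_instance

-- ===== CLAIM (what is proved, stated in full; the proofs are below) =====
def Claim_equal_find_field_block : Prop := ∀ (stanza : List String) (field : String), Dom_find_field_block stanza field → Spec_find_field_block stanza field (find_field_block stanza field)

-- ===== LEMMAS AND PROOFS =====
theorem pvAltAux_eq (stanza : List String) (header : String) :
    ∀ (rest : List String) (i : Nat), stanza.drop i = rest →
      pvAltAux header i rest = (pvFindA stanza header i rest, pvInnerWhile stanza i) := by
  intro rest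
  induction rest with
  | nil =>
      intro i hd
      have hlen : stanza.length ≤ i := by
        by_contra h
        have := List.drop_eq_nil_iff.mp hd
        omega
      rw [pvInnerWhile]
      simp [pvAltAux, pvFindA]
      omega
  | cons l ls ih =>
      intro i hd
      have hi : i < stanza.length := by
        by_contra h
        rw [List.drop_eq_nil_of_le (by omega)] at hd
        simp at hd
      have h1 : stanza[i]? = some l := by
        have h0 : (stanza.drop i).head? = some l := by rw [hd]; rfl
        simpa [List.head?_drop] using h0
      have hget : stanza[i]! = l := by
        rw [List.getElem!_eq_getElem?_getD, h1]; rfl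
      have hds : stanza.drop (i+1) = ls := by
        have h2 := congrArg (List.drop 1) hd
        simpa [List.drop_drop, Nat.add_comm] using h2
      have ihs := ih (i+1) hds
      rw [pvInnerWhile]
      simp only [pvAltAux, pvFindA, ihs, hi, hget, true_and]
      by_cases hind : pvIndent l <;> simp [hind]


-- ===== VERDICT (by name: the statement is the Claim_ definition above) =====
theorem find_field_block_spec : Claim_equal_find_field_block := by
  intro stanza field _
  unfold Spec_find_field_block find_field_block find_field_block_alt
  rw [pvAltAux_eq stanza (field ++ ":") stanza 0 (by simp)]
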